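-- pv_equiv track=rewrite | github.com/sangqkim/DS2 | Python I/HW2/손민우/16_B.py | sums_to
-- ===== SOURCE A (Python) =====
-- def sums_to(lst, k):
-- 	if len(lst) == 0:
-- 		if k == 0:
-- 			return True
-- 		else:
-- 			return False
-- 	else:
-- 		return sums_to(lst[1:], k-lst[0])
-- ===== SOURCE B (Python) =====
-- def sums_to(lst, k):
--     total = 0
--     for x in lst:
--         total += x
--     return total == k
-- ===== Notes on version B (the rewrite author's own statement) =====
-- stated objective: faster
-- what changed: Replaces A's recursive peel-and-subtract (slicing the list and decrementing k each call) with a single iterative pass accumulating a running total, then one comparison with k.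
import Mathlib
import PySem

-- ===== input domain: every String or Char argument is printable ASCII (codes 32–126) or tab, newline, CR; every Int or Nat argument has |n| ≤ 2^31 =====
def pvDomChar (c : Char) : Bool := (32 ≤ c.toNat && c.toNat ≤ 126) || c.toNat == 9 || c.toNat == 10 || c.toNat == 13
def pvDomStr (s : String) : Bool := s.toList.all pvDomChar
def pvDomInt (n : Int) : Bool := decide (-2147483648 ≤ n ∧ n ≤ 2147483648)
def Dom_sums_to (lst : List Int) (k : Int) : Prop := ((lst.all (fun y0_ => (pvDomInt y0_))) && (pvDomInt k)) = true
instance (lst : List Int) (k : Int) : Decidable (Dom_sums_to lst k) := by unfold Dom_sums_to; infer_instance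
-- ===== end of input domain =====

-- B replaces A's recursive peel-and-subtract with an iterative running-total loop (O(n) instead of quadratic slicing); objective: faster.

-- ===== PORT A =====
def sums_to (lst : List Int) (k : Int) : Bool :=
  match lst with
  | [] => if k = 0 then true else false
  | x :: rest => sums_to rest (k - x)

-- ===== PORT B =====
def sums_to_alt (lst : List Int) (k : Int) : Bool :=
  (lst.foldl (fun total x => total + x) 0) = k

-- ===== PRECONDITION & SPEC =====
def Spec_sums_to (lst : List Int) (k : Int) (out : Bool) : Prop := out = sums_to_alt lst k
instance (lst : List Int) (k : Int) (out : Bool) : Decidable (Spec_sums_to lst k out) := by unfold Spec_sums_to; infer_instance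

-- ===== CLAIM (what is proved, stated in full; the proofs are below) =====
def Claim_equal_sums_to : Prop := ∀ (lst : List Int) (k : Int), Dom_sums_to lst k → Spec_sums_to lst k (sums_to lst k)

-- ===== LEMMAS AND PROOFS =====

-- A computes (k - sum lst == 0); B computes (total + sum lst == k), generalized over the accumulator.
theorem sums_to_eq (lst : List Int) (k t : Int) :
    sums_to lst (k - t) = (lst.foldl (fun total x => total + x) t = k) := by
  induction lst generalizing t with
  | nil => simp [sums_to]; constructor <;> intro h <;> omega
  | cons x rest ih =>
    simp only [sums_to, List.foldl]
    have : k - t - x = k - (t + x) := by ring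
    rw [this, ih]

-- ===== VERDICT (by name: the statement is the Claim_ definition above) =====
theorem sums_to_spec : Claim_equal_sums_to := by
  intro lst k _
  unfold Spec_sums_to sums_to_alt
  have h := sums_to_eq lst k 0
  rw [sub_zero] at h
  cases hb : sums_to lst k <;> simp_all
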